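-- pv_equiv track=rewrite | github.com/AntonioPelayo/coffee-canary | src/utils/db.py | _resolve_table
-- ===== SOURCE A (Python) =====
-- from typing import Dict, Optional, Tuple
--
-- _ALLOWED_TABLES: Dict[str, Tuple[str, str]] = {
--     # Roasters
--     "staging.roasters_raw": ("staging", "roasters_raw"),
--     "roasters_raw": ("staging", "roasters_raw"),
--     "warehouse.dim_roaster": ("warehouse", "dim_roaster"),
--     "dim_roaster": ("warehouse", "dim_roaster"),
--     "coffee_roasters": ("warehouse", "dim_roaster"),
--     # Beans
--     "staging.beans_raw": ("staging", "beans_raw"),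
--     "beans_raw": ("staging", "beans_raw"),
--     "warehouse.fact_coffee_beans": ("warehouse", "fact_coffee_beans"),
--     "fact_coffee_beans": ("warehouse", "fact_coffee_beans"),
--     "coffee_beans": ("warehouse", "fact_coffee_beans")
-- }
--
-- def _resolve_table(table_key: str) -> Optional[Tuple[str, str]]:
--     """Resolve a user-friendly table identifier to a (schema, table) tuple."""
--     normalized = table_key.strip().lower()
--     if normalized in _ALLOWED_TABLES:
--         return _ALLOWED_TABLES[normalized]
--     if "." not in normalized:
--         for dotted, resolved in _ALLOWED_TABLES.items():
--             if dotted.split(".", 1)[1] == normalized: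
--                 return resolved
--     return None
-- ===== SOURCE B (Python) =====
-- from typing import Dict, Optional, Tuple
--
-- _ALLOWED_TABLES: Dict[str, Tuple[str, str]] = {
--     "staging.roasters_raw": ("staging", "roasters_raw"),
--     "roasters_raw": ("staging", "roasters_raw"),
--     "warehouse.dim_roaster": ("warehouse", "dim_roaster"),
--     "dim_roaster": ("warehouse", "dim_roaster"),
--     "coffee_roasters": ("warehouse", "dim_roaster"),
--     "staging.beans_raw": ("staging", "beans_raw"),
--     "beans_raw": ("staging", "beans_raw"),
--     "warehouse.fact_coffee_beans": ("warehouse", "fact_coffee_beans"),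
--     "fact_coffee_beans": ("warehouse", "fact_coffee_beans"),
--     "coffee_beans": ("warehouse", "fact_coffee_beans")
-- }
--
-- # Flattened index built once: every key, plus the post-dot suffix of dotted keys
-- # (first occurrence wins). Lookup is then a single dict.get.
-- _LOOKUP: Dict[str, Tuple[str, str]] = {}
-- for _key, _target in _ALLOWED_TABLES.items():
--     _LOOKUP.setdefault(_key, _target)
--     if "." in _key:
--         _LOOKUP.setdefault(_key.split(".", 1)[1], _target)
--
-- def _resolve_table(table_key: str) -> Optional[Tuple[str, str]]:
--     """Resolve a user-friendly table identifier to a (schema, table) tuple."""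
--     return _LOOKUP.get(table_key.strip().lower())
-- ===== Notes on version B (the rewrite author's own statement) =====
-- stated objective: simpler
-- what changed: B builds one flattened lookup dict (every key plus each dotted key's post-dot suffix) once at module load, so _resolve_table is a single dict.get with no membership test, no dotted-guard branch and no fallback scan over the table.
-- crash fix: On any input whose stripped-lowercased form is neither a table key nor contains a dot, A's fallback loop indexes split into its second piece on a dotless table key and raises IndexError; B returns None there. — e.g. on _resolve_table("foo"): A raises IndexError, B returns none
import Mathlib
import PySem

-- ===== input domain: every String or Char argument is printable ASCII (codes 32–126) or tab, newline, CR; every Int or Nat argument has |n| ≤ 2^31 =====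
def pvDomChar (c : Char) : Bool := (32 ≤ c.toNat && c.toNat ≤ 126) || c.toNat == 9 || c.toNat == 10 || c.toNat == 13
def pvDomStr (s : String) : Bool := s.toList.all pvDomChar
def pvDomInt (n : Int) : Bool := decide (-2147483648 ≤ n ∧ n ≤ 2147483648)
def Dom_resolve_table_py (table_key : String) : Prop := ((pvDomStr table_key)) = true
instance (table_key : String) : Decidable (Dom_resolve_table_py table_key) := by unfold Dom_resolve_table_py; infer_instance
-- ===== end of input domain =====

-- B replaces A's membership test + dotted-guard fallback scan by one prebuilt flattened
-- lookup dict (keys plus post-dot suffixes) and a single get — objective: simpler.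

-- ===== PORT A =====
-- _ALLOWED_TABLES as an insertion-ordered association list (shared table constant)
def pvAllowed : List (String × String × String) := [
  ("staging.roasters_raw", ("staging", "roasters_raw")),
  ("roasters_raw", ("staging", "roasters_raw")),
  ("warehouse.dim_roaster", ("warehouse", "dim_roaster")),
  ("dim_roaster", ("warehouse", "dim_roaster")),
  ("coffee_roasters", ("warehouse", "dim_roaster")),
  ("staging.beans_raw", ("staging", "beans_raw")),
  ("beans_raw", ("staging", "beans_raw")),
  ("warehouse.fact_coffee_beans", ("warehouse", "fact_coffee_beans")),
  ("fact_coffee_beans", ("warehouse", "fact_coffee_beans")),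
  ("coffee_beans", ("warehouse", "fact_coffee_beans"))]

def pvDictA : PySem.Dict String (String × String) := PySem.Dict.ofList pvAllowed

-- the fallback 'for dotted, resolved in _ALLOWED_TABLES.items(): …' loop;
-- 'none' at a dotless key models the IndexError of split(".",1)[1] (outside Pre_)
def pvALoop (normalized : String) : List (String × String × String) → Option (String × String)
  | [] => none
  | (dotted, resolved) :: rest =>
    match PySem.List.pyGet? ((PySem.Str.splitMax? dotted "." 1).getD []) 1 with
    | none => none
    | some piece => if piece = normalized then some resolved else pvALoop normalized rest

def pvACore (normalized : String) : Option (String × String) :=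
  if pvDictA.contains normalized then pvDictA.get? normalized
  else if PySem.Str.isIn "." normalized = false then pvALoop normalized pvDictA.items
  else none

def resolve_table_py (table_key : String) : Option (String × String) :=
  pvACore (PySem.Str.lower (PySem.Str.strip table_key))

-- ===== PORT B =====
-- _LOOKUP: the flattened index built once by the module-level loop in Source B
def pvLookup : PySem.Dict String (String × String) :=
  pvAllowed.foldl (fun d kv =>
    let d' := d.setdefault kv.1 kv.2
    if PySem.Str.isIn "." kv.1 then
      d'.setdefault (((PySem.Str.splitMax? kv.1 "." 1).getD []).getD 1 "") kv.2
    else d') PySem.Dict.empty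

def resolve_table_py_alt (table_key : String) : Option (String × String) :=
  pvLookup.get? (PySem.Str.lower (PySem.Str.strip table_key))

-- ===== PRECONDITION & SPEC =====
-- Pre_ excludes exactly the inputs on which A raises IndexError: the stripped-lowercased
-- key is not in the table and contains no dot (the fallback loop then indexes split(".",1)[1]
-- on the dotless key "roasters_raw").
def Pre_resolve_table_py (table_key : String) : Prop :=
  PySem.Str.lower (PySem.Str.strip table_key) ∈
    ["staging.roasters_raw", "roasters_raw", "warehouse.dim_roaster", "dim_roaster",
     "coffee_roasters", "staging.beans_raw", "beans_raw", "warehouse.fact_coffee_beans",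
     "fact_coffee_beans", "coffee_beans"] ∨
  PySem.Str.isIn "." (PySem.Str.lower (PySem.Str.strip table_key)) = true
instance (table_key : String) : Decidable (Pre_resolve_table_py table_key) := by
  unfold Pre_resolve_table_py; infer_instance

def pvWitness_resolve_table_py : String := " Coffee_Beans "

-- A raises IndexError on any input whose stripped-lowercased form is neither a table key
-- nor contains a dot; B returns none there.
def Raises_resolve_table_py (table_key : String) : Prop :=
  ¬ (PySem.Str.lower (PySem.Str.strip table_key) ∈
    ["staging.roasters_raw", "roasters_raw", "warehouse.dim_roaster", "dim_roaster",
     "coffee_roasters", "staging.beans_raw", "beans_raw", "warehouse.fact_coffee_beans",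
     "fact_coffee_beans", "coffee_beans"]) ∧
  PySem.Str.isIn "." (PySem.Str.lower (PySem.Str.strip table_key)) = false
instance (table_key : String) : Decidable (Raises_resolve_table_py table_key) := by
  unfold Raises_resolve_table_py; infer_instance

def pvRaiseWitness_resolve_table_py : String := "foo"
def pvRaiseWitnessOut_resolve_table_py : Option (String × String) := none

def Spec_resolve_table_py (table_key : String) (out : Option (String × String)) : Prop :=
  out = resolve_table_py_alt table_key
instance (table_key : String) (out : Option (String × String)) : Decidable (Spec_resolve_table_py table_key out) := by
  unfold Spec_resolve_table_py; infer_instance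

-- ===== CLAIM (what is proved, stated in full; the proofs are below) =====
def Claim_equal_resolve_table_py : Prop := ∀ (table_key : String), Dom_resolve_table_py table_key → Pre_resolve_table_py table_key → Spec_resolve_table_py table_key (resolve_table_py table_key)
def Claim_raises_resolve_table_py : Prop := (∀ (table_key : String), Dom_resolve_table_py table_key → Raises_resolve_table_py table_key → ¬ Pre_resolve_table_py table_key) ∧ (Dom_resolve_table_py (pvRaiseWitness_resolve_table_py) ∧ Raises_resolve_table_py (pvRaiseWitness_resolve_table_py) ∧ resolve_table_py_alt (pvRaiseWitness_resolve_table_py) = pvRaiseWitnessOut_resolve_table_py)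

-- ===== LEMMAS AND PROOFS =====

def pvKeys : List String :=
  ["staging.roasters_raw", "roasters_raw", "warehouse.dim_roaster", "dim_roaster",
   "coffee_roasters", "staging.beans_raw", "beans_raw", "warehouse.fact_coffee_beans",
   "fact_coffee_beans", "coffee_beans"]

theorem pvDictA_keys : pvDictA.keys = pvKeys := by decide
theorem pvLookup_keys : pvLookup.keys = pvKeys := by decide

theorem pvCore_eq (n : String)
    (h : n ∈ pvKeys ∨ PySem.Str.isIn "." n = true) :
    pvACore n = pvLookup.get? n := by
  by_cases hk : n ∈ pvKeys
  · simp only [pvKeys, List.mem_cons, List.not_mem_nil, or_false] at hk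
    rcases hk with rfl | rfl | rfl | rfl | rfl | rfl | rfl | rfl | rfl | rfl <;> decide
  · have hdot : PySem.Str.isIn "." n = true := h.resolve_left hk
    have hca : pvDictA.contains n = false := by
      rw [PySem.Dict.contains_eq_decide_mem_keys, pvDictA_keys]
      simp [hk]
    have hlb : pvLookup.get? n = none := by
      rw [PySem.Dict.get?_eq_none_iff_not_mem_keys, pvLookup_keys]
      exact hk
    have hdot' : PySem.Chars.isIn ['.'] n.toList = true := by
      simpa [PySem.Str.isIn] using hdot
    simp [pvACore, hca, hdot', hlb, PySem.Str.isIn]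

-- ===== VERDICT (by name: the statement is the Claim_ definition above) =====
theorem resolve_table_py_spec : Claim_equal_resolve_table_py := by
  intro tk _ hpre
  unfold Spec_resolve_table_py resolve_table_py resolve_table_py_alt
  exact pvCore_eq _ hpre

theorem resolve_table_py_raises : Claim_raises_resolve_table_py := by
  unfold Claim_raises_resolve_table_py
  exact ⟨(by
    intro tk _ hra hpre
    rcases hpre with hmem | hdot
    · exact hra.1 hmem
    · rw [hra.2] at hdot
      simp at hdot), by decide⟩

-- self-check: the raise witness really lies in the raise region (cites the theorem above)
theorem pvRaiseWitness_ok : Raises_resolve_table_py pvRaiseWitness_resolve_table_py := by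
  have h := resolve_table_py_raises
  unfold Claim_raises_resolve_table_py at h
  exact h.2.2.1
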